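-- pv_equiv track=rewrite | github.com/ZRTMRH/polycube-solver | hybrid_solver.py | _solution_from_preplaced_input
-- ===== SOURCE A (Python) =====
-- def _solution_from_preplaced_input(pieces, grid_size):
--     """Return a solution if pieces are already absolute, disjoint in-grid placements."""
--     expected_volume = grid_size ** 3
--     if sum(len(p) for p in pieces) != expected_volume:
--         return None
--
--     used = set()
--     solution = {}
--     for pidx, piece in enumerate(pieces):
--         cells = set()
--         for cell in piece:
--             if len(cell) != 3:
--                 return None
--             x, y, z = int(cell[0]), int(cell[1]), int(cell[2])
--             if not (0 <= x < grid_size and 0 <= y < grid_size and 0 <= z < grid_size):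
--                 return None
--             cells.add((x, y, z))
--         if len(cells) != len(piece):
--             return None
--         if used & cells:
--             return None
--         used |= cells
--         solution[pidx] = frozenset(cells)
--
--     if len(used) != expected_volume:
--         return None
--     return solution
-- ===== SOURCE B (Python) =====
-- def _solution_from_preplaced_input(pieces, grid_size):
--     """Staged flat-list validation: flatten all cells once, bulk-check shape and
--     bounds, then rely on the single distinct-count == volume test (which subsumes
--     A's per-piece duplicate and pairwise overlap guards), and build the solution
--     dict afterwards in one comprehension."""
--     expected_volume = grid_size ** 3
--     if sum(len(p) for p in pieces) != expected_volume:
--         return None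
--     flat = [cell for piece in pieces for cell in piece]
--     if any(len(cell) != 3 for cell in flat):
--         return None
--     coords = [(int(c[0]), int(c[1]), int(c[2])) for c in flat]
--     if any(not (0 <= x < grid_size and 0 <= y < grid_size and 0 <= z < grid_size)
--            for (x, y, z) in coords):
--         return None
--     if len(set(coords)) != expected_volume:
--         return None
--     return {i: frozenset(p) for i, p in enumerate(pieces)}
-- ===== Notes on version B (the rewrite author's own statement) =====
-- stated objective: simpler
-- what changed: B replaces A's nested accumulator loop (per-piece cells set, in-loop duplicate and overlap guards, incremental dict build) by staged whole-input passes: flatten all cells once, bulk bounds check, one distinct-count-equals-volume test that subsumes both of A's in-loop guards, and a final dict comprehension.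
import Mathlib
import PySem

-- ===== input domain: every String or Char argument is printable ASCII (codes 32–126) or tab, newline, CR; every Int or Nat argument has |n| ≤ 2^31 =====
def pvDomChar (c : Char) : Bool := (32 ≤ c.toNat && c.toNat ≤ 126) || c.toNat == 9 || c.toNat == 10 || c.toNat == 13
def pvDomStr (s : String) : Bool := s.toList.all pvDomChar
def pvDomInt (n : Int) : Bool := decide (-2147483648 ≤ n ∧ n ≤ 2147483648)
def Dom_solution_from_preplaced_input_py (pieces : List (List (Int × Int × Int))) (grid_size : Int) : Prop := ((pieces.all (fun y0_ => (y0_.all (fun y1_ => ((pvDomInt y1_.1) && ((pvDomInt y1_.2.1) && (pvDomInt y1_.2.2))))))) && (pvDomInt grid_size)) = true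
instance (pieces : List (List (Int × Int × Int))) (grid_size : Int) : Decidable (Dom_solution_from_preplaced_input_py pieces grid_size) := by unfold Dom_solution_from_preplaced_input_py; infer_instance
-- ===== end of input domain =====

-- B replaces A's nested accumulator loop by staged whole-input passes (flatten, bulk
-- bounds check, one distinct-count == volume test subsuming A's per-piece duplicate and
-- overlap guards, final dict comprehension); objective: simpler.

-- ===== PORT A =====
-- inner 'for cell in piece' loop: builds the per-piece `cells` set.
-- `len(cell) != 3` is always false for a typed triple, and int() is the identity on ints;
-- `x, y, z = ...` is the destructuring below, and `(x, y, z)` rebuilds the cell.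
def pvAcells (grid_size : Int) : List (Int × Int × Int) → PySem.Set (Int × Int × Int) → Option (PySem.Set (Int × Int × Int))
  | [], cells => some cells
  | cell :: rest, cells =>
      let x := cell.1; let y := cell.2.1; let z := cell.2.2
      if ¬ (0 ≤ x ∧ x < grid_size ∧ 0 ≤ y ∧ y < grid_size ∧ 0 ≤ z ∧ z < grid_size) then none
      else pvAcells grid_size rest (PySem.Set.add cells (x, y, z))

-- outer 'for pidx, piece in enumerate(pieces)' loop; `solution[pidx] = frozenset(cells)`
-- always inserts a fresh key, so the dict insert is an append.
def pvAloop (grid_size : Int) : List (List (Int × Int × Int)) → Int → PySem.Set (Int × Int × Int) → List (Int × List (Int × Int × Int)) → Option (PySem.Set (Int × Int × Int) × List (Int × List (Int × Int × Int)))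
  | [], _, used, sol => some (used, sol)
  | piece :: rest, pidx, used, sol =>
      match pvAcells grid_size piece PySem.Set.empty with
      | none => none
      | some cells =>
          if PySem.Set.len cells ≠ PySem.List.len piece then none
          else if PySem.Set.inter used cells ≠ [] then none  -- `if used & cells:` (truthy = nonempty)
          else pvAloop grid_size rest (pidx + 1) (PySem.Set.union used cells) (sol ++ [(pidx, cells)])

def solution_from_preplaced_input_py (pieces : List (List (Int × Int × Int))) (grid_size : Int) : Option (List (Int × List (Int × Int × Int))) :=
  let expected_volume := grid_size ^ 3
  if (pieces.map (fun p => PySem.List.len p)).sum ≠ expected_volume then none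
  else
    match pvAloop grid_size pieces 0 PySem.Set.empty [] with
    | none => none
    | some (used, solution) =>
        if PySem.Set.len used ≠ expected_volume then none else some solution

-- ===== PORT B =====
-- B has no loops with state: a flatten comprehension, two bulk `any` checks
-- (`len(cell) != 3` is always false on typed triples and int() is the identity,
-- so the coords pass keeps the same triples), one set() count, one comprehension.
def solution_from_preplaced_input_py_alt (pieces : List (List (Int × Int × Int))) (grid_size : Int) : Option (List (Int × List (Int × Int × Int))) :=
  let expected_volume := grid_size ^ 3
  if (pieces.map (fun p => PySem.List.len p)).sum ≠ expected_volume then none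
  else
    let flat := pieces.flatMap (fun piece => piece)
    -- any(not (0 <= x < g and 0 <= y < g and 0 <= z < g) for (x, y, z) in coords)
    if flat.any (fun c => !decide (0 ≤ c.1 ∧ c.1 < grid_size ∧ 0 ≤ c.2.1 ∧ c.2.1 < grid_size ∧ 0 ≤ c.2.2 ∧ c.2.2 < grid_size)) then none
    else if PySem.Set.len (PySem.Set.ofList flat) ≠ expected_volume then none
    else  -- {i: frozenset(p) for i, p in enumerate(pieces)}
      some (pieces.zipIdx.map (fun pi => ((pi.2 : Int), PySem.Set.ofList pi.1)))

-- ===== PRECONDITION & SPEC =====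
def Spec_solution_from_preplaced_input_py (pieces : List (List (Int × Int × Int))) (grid_size : Int) (out : Option (List (Int × List (Int × Int × Int)))) : Prop := out = solution_from_preplaced_input_py_alt pieces grid_size
instance (pieces : List (List (Int × Int × Int))) (grid_size : Int) (out : Option (List (Int × List (Int × Int × Int)))) : Decidable (Spec_solution_from_preplaced_input_py pieces grid_size out) := by unfold Spec_solution_from_preplaced_input_py; infer_instance

-- ===== CLAIM =====
def Claim_equal_solution_from_preplaced_input_py : Prop := ∀ (pieces : List (List (Int × Int × Int))) (grid_size : Int), Dom_solution_from_preplaced_input_py pieces grid_size → Spec_solution_from_preplaced_input_py pieces grid_size (solution_from_preplaced_input_py pieces grid_size)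

-- ===== LEMMAS AND PROOFS =====

-- the in-bounds predicate both programs test
def pvInB (g : Int) (c : Int × Int × Int) : Bool :=
  decide (0 ≤ c.1 ∧ c.1 < g ∧ 0 ≤ c.2.1 ∧ c.2.1 < g ∧ 0 ≤ c.2.2 ∧ c.2.2 < g)

-- total number of cells listed (the multiset size, before dedup)
def pvSumLens (pieces : List (List (Int × Int × Int))) : Nat := (pieces.map List.length).sum

-- set(xs) is a sublist of xs (first occurrences, in order)
theorem pv_ofList_sublist {α : Type} [BEq α] [LawfulBEq α] (xs : List α) :
    (PySem.Set.ofList xs).Sublist xs := by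
  induction xs with
  | nil => simp [PySem.Set.ofList_nil]
  | cons x xs ih =>
      rw [PySem.Set.ofList_cons]
      exact List.Sublist.cons₂ x (List.Sublist.trans List.filter_sublist ih)

-- |s.update(xs)| ≤ |s| + |xs|
theorem pv_len_update_le {α : Type} [BEq α] [LawfulBEq α] (s : PySem.Set α) (xs : List α) :
    (PySem.Set.update s xs).length ≤ s.length + xs.length := by
  rw [PySem.Set.update_eq_append_filter]
  have h1 := List.length_filter_le (fun y => !PySem.Set.contains s y) (PySem.Set.ofList xs)
  have h2 := PySem.Set.length_ofList_le xs
  simp only [List.length_append]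
  omega

-- closed form of A's inner loop
theorem pvAcells_eq (g : Int) (piece : List (Int × Int × Int)) (cells : PySem.Set (Int × Int × Int)) :
    pvAcells g piece cells =
      if piece.all (pvInB g) then some (PySem.Set.update cells piece) else none := by
  induction piece generalizing cells with
  | nil => simp [pvAcells, PySem.Set.update]
  | cons c rest ih =>
      obtain ⟨x, y, z⟩ := c
      simp only [pvAcells, List.all_cons]
      by_cases h : 0 ≤ x ∧ x < g ∧ 0 ≤ y ∧ y < g ∧ 0 ≤ z ∧ z < g
      · rw [if_neg (not_not_intro h), ih, PySem.Set.update_cons]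
        simp only [pvInB, decide_eq_true h, Bool.true_and]
      · simp [h, pvInB]

-- the main characterisation of A's outer loop against B's flat-list quantities
theorem pv_outer (g : Int) : ∀ (pieces : List (List (Int × Int × Int))) (k : Nat)
    (used : PySem.Set (Int × Int × Int)) (sol : List (Int × List (Int × Int × Int))),
    used.Nodup →
    ((∀ u s, pvAloop g pieces (k : Int) used sol = some (u, s) →
        pieces.all (fun p => p.all (pvInB g)) = true ∧
        u = PySem.Set.update used (pieces.flatMap (fun piece => piece)) ∧ u.Nodup ∧
        u.length = used.length + pvSumLens pieces ∧
        s = sol ++ (pieces.zipIdx k).map (fun pi => ((pi.2 : Int), PySem.Set.ofList pi.1))) ∧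
     (pvAloop g pieces (k : Int) used sol = none →
        pieces.all (fun p => p.all (pvInB g)) = false ∨
        (PySem.Set.update used (pieces.flatMap (fun piece => piece))).length < used.length + pvSumLens pieces)) := by
  intro pieces
  induction pieces with
  | nil =>
      intro k used sol hnd
      constructor
      · intro u s h
        simp only [pvAloop, Option.some.injEq, Prod.mk.injEq] at h
        obtain ⟨rfl, rfl⟩ := h
        simp [PySem.Set.update_nil, pvSumLens, hnd]
      · intro h; simp [pvAloop] at h
  | cons piece rest ih =>
      intro k used sol hnd
      by_cases hall : piece.all (pvInB g) = true
      case neg =>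
        have hA : pvAloop g (piece :: rest) (k : Int) used sol = none := by
          simp only [pvAloop]; rw [pvAcells_eq, if_neg hall]
        refine ⟨fun u s h => ?_, fun _ => Or.inl ?_⟩
        · rw [hA] at h; cases h
        · simp only [List.all_cons, Bool.and_eq_false_iff]
          exact Or.inl (by simpa using hall)
      case pos =>
        have hcells : pvAcells g piece PySem.Set.empty = some (PySem.Set.ofList piece) := by
          rw [pvAcells_eq, if_pos hall]; rfl
        have hApe : ∀ pidx : Int, pvAloop g (piece :: rest) pidx used sol =
            (if PySem.Set.len (PySem.Set.ofList piece) ≠ PySem.List.len piece then none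
             else if PySem.Set.inter used (PySem.Set.ofList piece) ≠ [] then none
             else pvAloop g rest (pidx + 1) (PySem.Set.union used (PySem.Set.ofList piece))
                    (sol ++ [(pidx, PySem.Set.ofList piece)])) := by
          intro pidx; simp only [pvAloop, hcells]
        have hcast : ((k : Int) + 1) = ((k + 1 : Nat) : Int) := by push_cast; ring
        have hflat : (piece :: rest).flatMap (fun piece => piece) =
            piece ++ rest.flatMap (fun piece => piece) := by simp
        have hsplit : PySem.Set.update used ((piece :: rest).flatMap (fun piece => piece)) =
            PySem.Set.update (PySem.Set.update used piece) (rest.flatMap (fun piece => piece)) := by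
          rw [hflat, PySem.Set.update_append]
        by_cases hgood : (PySem.Set.ofList piece).length = piece.length ∧
            ∀ y ∈ used, y ∉ PySem.Set.ofList piece
        · -- both of A's guards pass
          have hceq : PySem.Set.ofList piece = piece :=
            (pv_ofList_sublist piece).eq_of_length hgood.1
          have hnodup_piece : piece.Nodup := by
            rw [← hceq]; exact PySem.Set.nodup_ofList piece
          have hdisj : ∀ x ∈ piece, x ∉ used := by
            intro x hx hxu
            exact hgood.2 x hxu (by rw [hceq]; exact hx)
          have hupd : PySem.Set.update used piece = used ++ piece :=
            PySem.Set.update_eq_append_of_disjoint used piece hnodup_piece hdisj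
          have hnd' : (PySem.Set.update used piece).Nodup := PySem.Set.nodup_update used piece hnd
          have g1 : ¬ (PySem.Set.len (PySem.Set.ofList piece) ≠ PySem.List.len piece) := by
            simp [PySem.Set.len, PySem.List.len, hgood.1]
          have g2 : ¬ (PySem.Set.inter used (PySem.Set.ofList piece) ≠ []) := by
            simp only [PySem.Set.inter, ne_eq, not_not, List.filter_eq_nil_iff]
            intro y hy
            simpa using fun hmem => hgood.2 y hy hmem
          have hun : PySem.Set.union used (PySem.Set.ofList piece) = PySem.Set.update used piece := by
            rw [hceq]; rfl
          obtain ⟨ih1, ih2⟩ := ih (k + 1) (PySem.Set.update used piece)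
            (sol ++ [((k : Int), PySem.Set.ofList piece)]) hnd'
          constructor
          · intro u s h
            rw [hApe, if_neg g1, if_neg g2, hun, hcast] at h
            obtain ⟨b0, b1, b2, b3, b4⟩ := ih1 u s h
            refine ⟨by simp [hall, b0], by rw [hsplit]; exact b1, b2, ?_, ?_⟩
            · rw [b3, hupd]; simp [pvSumLens]; omega
            · rw [b4, List.zipIdx_cons]; simp
          · intro h
            rw [hApe, if_neg g1, if_neg g2, hun, hcast] at h
            rcases ih2 h with hBn | hlt
            · exact Or.inl (by simp only [List.all_cons, hall, Bool.true_and]; exact hBn)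
            · refine Or.inr ?_
              rw [hsplit]
              have hul : (PySem.Set.update used piece).length = used.length + piece.length := by
                rw [hupd]; simp
              simp only [pvSumLens, List.map_cons, List.sum_cons] at hlt ⊢
              omega
        · -- a guard of A fails: A returns none, the distinct-cell count falls strictly behind
          have hAn : pvAloop g (piece :: rest) (k : Int) used sol = none := by
            rw [hApe]
            by_cases hlen : (PySem.Set.ofList piece).length = piece.length
            · have h2 : ∃ y ∈ used, y ∈ PySem.Set.ofList piece := by
                rcases not_and_or.mp hgood with h1 | h2
                · exact absurd hlen h1
                · push_neg at h2; exact h2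
              obtain ⟨y, hyu, hyc⟩ := h2
              have g2' : PySem.Set.inter used (PySem.Set.ofList piece) ≠ [] := by
                intro hnil
                exact (List.filter_eq_nil_iff.mp hnil y hyu)
                  (by simpa [PySem.Set.contains_iff] using hyc)
              rw [if_neg (show ¬ (PySem.Set.len (PySem.Set.ofList piece) ≠ PySem.List.len piece) from by
                    simp only [PySem.Set.len, PySem.List.len, ne_eq, Nat.cast_inj, not_not]
                    exact hlen),
                  if_pos g2']
            · rw [if_pos (show PySem.Set.len (PySem.Set.ofList piece) ≠ PySem.List.len piece from by
                    simp only [PySem.Set.len, PySem.List.len, ne_eq, Nat.cast_inj]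
                    exact hlen)]
          have hstrict : (PySem.Set.update used piece).length < used.length + piece.length := by
            rw [PySem.Set.update_eq_append_filter]
            simp only [List.length_append]
            rcases not_and_or.mp hgood with h1 | h2
            · have hle := PySem.Set.length_ofList_le piece
              have hlt : (PySem.Set.ofList piece).length < piece.length := lt_of_le_of_ne hle h1
              have := List.length_filter_le (fun y => !PySem.Set.contains used y) (PySem.Set.ofList piece)
              omega
            · push_neg at h2
              obtain ⟨y, hyu, hyc⟩ := h2
              have hdrop : ((PySem.Set.ofList piece).filter (fun y => !PySem.Set.contains used y)).length
                  < (PySem.Set.ofList piece).length := by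
                rcases List.append_of_mem hyc with ⟨s1, t1, heq⟩
                rw [heq, List.filter_append, List.filter_cons_of_neg (by simpa using hyu)]
                simp only [List.length_append, List.length_cons]
                have := List.length_filter_le (fun y => !PySem.Set.contains used y) s1
                have := List.length_filter_le (fun y => !PySem.Set.contains used y) t1
                omega
              have hle := PySem.Set.length_ofList_le piece
              omega
          refine ⟨fun u s h => (by rw [hAn] at h; cases h), fun _ => Or.inr ?_⟩
          rw [hsplit]
          have hb := pv_len_update_le (PySem.Set.update used piece) (rest.flatMap (fun piece => piece))
          have hfl : (rest.flatMap (fun piece => piece)).length = pvSumLens rest := by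
            simp [pvSumLens]
          simp only [pvSumLens, List.map_cons, List.sum_cons] at hb ⊢
          simp only [pvSumLens] at hfl
          omega

-- sum(len(p) for p in pieces) as an Int is the cast of pvSumLens
theorem pv_sum_cast (pieces : List (List (Int × Int × Int))) :
    (pieces.map (fun p => PySem.List.len p)).sum = (pvSumLens pieces : Int) := by
  simp only [pvSumLens, Nat.cast_list_sum, List.map_map]
  rfl

-- B's bulk bounds test over the flat list is the per-piece all-test A performs
theorem pv_any_flat (g : Int) (pieces : List (List (Int × Int × Int))) :
    ((pieces.flatMap (fun piece => piece)).any (fun c => !pvInB g c)) =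
      !(pieces.all (fun p => p.all (pvInB g))) := by
  induction pieces with
  | nil => simp
  | cons piece rest ih =>
      rw [List.flatMap_cons, List.any_append, ih, List.all_cons, Bool.not_and,
        ← List.not_all_eq_any_not]

-- ===== VERDICT (by name: the statement is the Claim_ definition above) =====
theorem solution_from_preplaced_input_py_spec : Claim_equal_solution_from_preplaced_input_py := by
  intro pieces g _
  unfold Spec_solution_from_preplaced_input_py
  unfold solution_from_preplaced_input_py solution_from_preplaced_input_py_alt
  simp only [pv_sum_cast]
  by_cases hv : (pvSumLens pieces : Int) ≠ g ^ 3
  · simp [hv]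
  · rw [not_ne_iff] at hv
    simp only [hv, ne_eq, not_true_eq_false, if_neg, not_false_iff]
    have hout := pv_outer g pieces 0 PySem.Set.empty [] (by simp [PySem.Set.empty])
    have hofl : PySem.Set.update ([] : PySem.Set (Int × Int × Int)) (pieces.flatMap (fun piece => piece)) =
        PySem.Set.ofList (pieces.flatMap (fun piece => piece)) :=
      PySem.Set.update_nil_left _
    rcases hA : pvAloop g pieces (0 : Int) PySem.Set.empty [] with _ | ⟨u, s⟩
    · rcases hout.2 (by exact_mod_cast hA) with hBd | hlt
      · have hany : ((pieces.flatMap (fun piece => piece)).any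
            (fun c => !decide (0 ≤ c.1 ∧ c.1 < g ∧ 0 ≤ c.2.1 ∧ c.2.1 < g ∧ 0 ≤ c.2.2 ∧ c.2.2 < g))) = true := by
          have h := pv_any_flat g pieces
          rw [hBd] at h
          simp only [pvInB] at h
          simpa using h
        rw [if_pos hany]
      · simp only [PySem.Set.empty] at hlt
        rw [hofl] at hlt
        simp only [List.length_nil, Nat.zero_add] at hlt
        have hne : ¬ ((PySem.Set.ofList (pieces.flatMap (fun piece => piece))).len = g ^ 3) := by
          simp only [PySem.Set.len]
          rw [← hv]
          exact_mod_cast Nat.ne_of_lt hlt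
        by_cases hc : ((pieces.flatMap (fun piece => piece)).any
            (fun c => !decide (0 ≤ c.1 ∧ c.1 < g ∧ 0 ≤ c.2.1 ∧ c.2.1 < g ∧ 0 ≤ c.2.2 ∧ c.2.2 < g))) = true
        · rw [if_pos hc]
        · rw [if_neg hc, if_pos hne]
    · obtain ⟨hbd, hu, _, hlen, hs⟩ := hout.1 u s (by exact_mod_cast hA)
      have hany : ((pieces.flatMap (fun piece => piece)).any
          (fun c => !decide (0 ≤ c.1 ∧ c.1 < g ∧ 0 ≤ c.2.1 ∧ c.2.1 < g ∧ 0 ≤ c.2.2 ∧ c.2.2 < g))) = false := by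
        have h := pv_any_flat g pieces
        rw [hbd] at h
        simp only [pvInB] at h
        simpa using h
      simp only [PySem.Set.empty] at hu hlen
      rw [hofl] at hu
      simp only [List.length_nil, Nat.zero_add] at hlen
      have hulen : (PySem.Set.ofList (pieces.flatMap (fun piece => piece))).len = g ^ 3 := by
        simp only [PySem.Set.len, ← hu, hlen, hv]
      have huu : PySem.Set.len u = g ^ 3 := by rw [hu]; exact hulen
      rw [hs]
      have hflat : List.flatMap (fun piece => piece) pieces = pieces.flatten := by simp
      rw [hflat] at hany hulen
      simp only [List.nil_append, hflat]
      rw [if_neg (not_not_intro huu)]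
      rw [if_neg (by rw [hany]; exact Bool.false_ne_true)]
      rw [if_neg (not_not_intro hulen)]
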